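-- pv_equiv track=rewrite | github.com/AndreaDiMartin/ParcialLengujesPr | Examen 2/misterioso.py | misterio
-- ===== SOURCE A (Python) =====
-- def misterio(p):
--     if p == []:
--         yield []
--     else:
--         for x in misterio(p[1:]):
--             #Verifica que el conjunto este en orden creciente, de lo contrario no lo retorna
--             test_list1 = x[:]
--             test_list1.sort()
--             if (test_list1 == x):
--                 yield x
--                 yield [p[0],*x]
-- ===== SOURCE B (Python) =====
-- def misterio(p):
--     # iterative bottom-up: maintain the whole sequence for the suffix, extend per element
--     seq = [[]]
--     for elem in reversed(p):
--         new = []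
--         for x in seq:
--             if sorted(x) == x:
--                 new.append(x)
--                 new.append([elem, *x])
--         seq = new
--     yield from seq
-- ===== Notes on version B (the rewrite author's own statement) =====
-- stated objective: alternative
-- what changed: Replaces the recursive generator with an iterative bottom-up loop that folds over the elements in reverse, rebuilding the full sequence of candidate sublists at each step.
import Mathlib
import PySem

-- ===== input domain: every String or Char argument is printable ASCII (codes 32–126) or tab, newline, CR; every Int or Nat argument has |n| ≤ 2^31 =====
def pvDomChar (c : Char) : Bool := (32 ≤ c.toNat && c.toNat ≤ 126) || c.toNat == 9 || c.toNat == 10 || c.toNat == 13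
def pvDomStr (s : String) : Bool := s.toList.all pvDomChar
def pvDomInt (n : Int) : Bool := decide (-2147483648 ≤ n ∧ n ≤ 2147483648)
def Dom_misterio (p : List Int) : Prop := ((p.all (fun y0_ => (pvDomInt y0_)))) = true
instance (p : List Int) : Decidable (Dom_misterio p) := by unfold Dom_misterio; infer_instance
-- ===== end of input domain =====

-- B replaces A's recursive generator by an iterative bottom-up fold over reversed p; same yields, same order.

-- ===== PORT A =====
-- the for-loop body of A: for each x of the recursive result, keep x and p[0]::x when sorted(x)==x
def misterioLoop (h : Int) : List (List Int) → List (List Int)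
  | [] => []
  | x :: rest =>
      if PySem.List.sorted x (fun y => y) false = x then
        x :: (h :: x) :: misterioLoop h rest
      else
        misterioLoop h rest

def misterio (p : List Int) : List (List Int) :=
  match p with
  | [] => [[]]
  | h :: t => misterioLoop h (misterio t)

-- ===== PORT B =====
-- inner loop of Source B: build `new` from the current seq
def misterioStepB (seq : List (List Int)) (elem : Int) : List (List Int) :=
  seq.foldl (fun new x =>
    if PySem.List.sorted x (fun y => y) false = x then new ++ [x, elem :: x] else new) []

def misterio_alt (p : List Int) : List (List Int) :=
  p.reverse.foldl misterioStepB [[]]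

-- ===== PRECONDITION & SPEC =====
def Spec_misterio (p : List Int) (out : List (List Int)) : Prop := out = misterio_alt p
instance (p : List Int) (out : List (List Int)) : Decidable (Spec_misterio p out) := by unfold Spec_misterio; infer_instance

-- ===== CLAIM (what is proved, stated in full; the proofs are below) =====
def Claim_equal_misterio : Prop := ∀ (p : List Int), Dom_misterio p → Spec_misterio p (misterio p)

-- ===== LEMMAS AND PROOFS =====
theorem misterioStepB_acc (seq : List (List Int)) (elem : Int) (acc : List (List Int)) :
    seq.foldl (fun new x =>
      if PySem.List.sorted x (fun y => y) false = x then new ++ [x, elem :: x] else new) acc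
    = acc ++ misterioLoop elem seq := by
  induction seq generalizing acc with
  | nil => simp [misterioLoop]
  | cons x rest ih =>
      simp only [List.foldl, misterioLoop]
      split_ifs with hx
      · rw [ih]; simp
      · rw [ih]

theorem misterioStepB_eq (seq : List (List Int)) (elem : Int) :
    misterioStepB seq elem = misterioLoop elem seq := by
  unfold misterioStepB
  simpa using misterioStepB_acc seq elem []

theorem misterio_eq_alt (p : List Int) : misterio p = misterio_alt p := by
  induction p with
  | nil => rfl
  | cons h t ih =>
      unfold misterio misterio_alt
      rw [List.reverse_cons, List.foldl_append]
      simp only [List.foldl]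
      rw [misterioStepB_eq]
      unfold misterio_alt at ih
      rw [← ih]

-- ===== VERDICT (by name: the statement is the Claim_ definition above) =====
theorem misterio_spec : Claim_equal_misterio := by
  intro p _
  exact misterio_eq_alt p
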